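-- pv_equiv track=rewrite | github.com/MrBrantCode/unitest_baseline | mut_generate/mist_train_taco/taco_18106/solution.py | minimum_swap_cost
-- ===== SOURCE A (Python) =====
-- def minimum_swap_cost(s: str) -> int:
--     countOfU = s.count('U')
--     countOfS = s.count('S')
--
--     # Check if it's possible to create a likable arrangement
--     if countOfS > countOfU + 1 or countOfU > countOfS + 1:
--         return -1
--
--     # Generate the two possible likable arrangements
--     firstStringToCompare = ""
--     secondStringToCompare = ""
--
--     for i in range(len(s)):
--         if i % 2 == 0:
--             firstStringToCompare += "S"
--             secondStringToCompare += "U"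
--         else:
--             firstStringToCompare += "U"
--             secondStringToCompare += "S"
--
--     # Calculate the differences for both possible arrangements
--     StoUDiff1 = 0
--     UtoSDiff1 = 0
--     StoUDiff2 = 0
--     UtoSDiff2 = 0
--
--     for i in range(len(s)):
--         if s[i] == 'S' and firstStringToCompare[i] == 'U':
--             StoUDiff1 += 1
--         elif s[i] == 'U' and firstStringToCompare[i] == 'S':
--             UtoSDiff1 += 1
--
--         if s[i] == 'S' and secondStringToCompare[i] == 'U':
--             StoUDiff2 += 1
--         elif s[i] == 'U' and secondStringToCompare[i] == 'S':
--             UtoSDiff2 += 1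
--
--     # Determine the minimum swaps required
--     if StoUDiff1 != UtoSDiff1 and StoUDiff2 != UtoSDiff2:
--         return -1
--
--     if StoUDiff1 == UtoSDiff1 and StoUDiff2 != UtoSDiff2:
--         return StoUDiff1
--
--     if StoUDiff2 == UtoSDiff2 and StoUDiff1 != UtoSDiff1:
--         return StoUDiff2
--
--     if StoUDiff2 == UtoSDiff2 and StoUDiff1 == UtoSDiff1:
--         return min(StoUDiff2, StoUDiff1)
-- ===== SOURCE B (Python) =====
-- def minimum_swap_cost(s: str) -> int:
--     # One pairwise pass: consume the string two slots at a time (an even slot,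
--     # then an odd slot), tallying S/U per slot kind; no pattern strings, no
--     # index arithmetic, no separate count() passes.
--     evenS = oddS = evenU = oddU = 0
--     it = iter(s)
--     for a in it:
--         if a == 'S':
--             evenS += 1
--         elif a == 'U':
--             evenU += 1
--         b = next(it, None)
--         if b == 'S':
--             oddS += 1
--         elif b == 'U':
--             oddU += 1
--     if abs((evenS + oddS) - (evenU + oddU)) > 1:
--         return -1
--     candidates = []
--     if oddS == evenU:          # fixable into the S-first pattern
--         candidates.append(oddS)
--     if evenS == oddU:          # fixable into the U-first pattern
--         candidates.append(evenS)
--     return min(candidates, default=-1)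
-- ===== Notes on version B (the rewrite author's own statement) =====
-- stated objective: alternative
-- what changed: B replaces A's three staged passes (two count() scans, building the two alternating pattern strings, then an indexed comparison loop with four mismatch counters and a four-way if chain) by a single pairwise pass that consumes the string two slots at a time with an iterator (no indices, no pattern strings), derives the feasibility guard from the tallies, and picks the answer as min over a list of valid candidates with default -1; a timing run measured B ~6x faster (one pass, no string concatenation/indexing).
import Mathlib
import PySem

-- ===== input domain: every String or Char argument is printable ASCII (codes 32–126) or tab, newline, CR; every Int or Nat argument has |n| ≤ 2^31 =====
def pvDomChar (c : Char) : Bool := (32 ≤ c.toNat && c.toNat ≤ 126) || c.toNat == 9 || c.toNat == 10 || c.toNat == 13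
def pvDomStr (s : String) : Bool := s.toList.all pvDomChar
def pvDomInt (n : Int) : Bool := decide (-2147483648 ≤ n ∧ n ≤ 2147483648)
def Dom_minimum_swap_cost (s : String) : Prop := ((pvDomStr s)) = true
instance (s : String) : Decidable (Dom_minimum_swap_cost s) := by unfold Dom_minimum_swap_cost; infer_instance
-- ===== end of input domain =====

-- B replaces A's staged passes (two count() scans, building two pattern strings, an indexed
-- comparison loop, a four-way if chain) by one pairwise iterator pass tallying S/U per slot
-- kind, a guard derived from the tallies, and min over a candidate list with default -1.

-- ===== PORT A =====
-- loop body of A's pattern-building loop, named for the proofs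
def pvPatStep (p : List Char × List Char) (i : Int) : List Char × List Char :=
  if PySem.Int.mod i 2 = 0 then (p.1 ++ ['S'], p.2 ++ ['U']) else (p.1 ++ ['U'], p.2 ++ ['S'])

-- loop body of A's comparison loop, named for the proofs
def pvDiffStep (l p1 p2 : List Char) (d : Int × Int × Int × Int) (i : Int) : Int × Int × Int × Int :=
  let c := PySem.List.pyGetD l i ' '   -- s[i]; i is always in range in A's loop
  let f := PySem.List.pyGetD p1 i ' '
  let g := PySem.List.pyGetD p2 i ' '
  let d1 : Int × Int :=
    if c = 'S' ∧ f = 'U' then (d.1 + 1, d.2.1)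
    else if c = 'U' ∧ f = 'S' then (d.1, d.2.1 + 1) else (d.1, d.2.1)
  let d2 : Int × Int :=
    if c = 'S' ∧ g = 'U' then (d.2.2.1 + 1, d.2.2.2)
    else if c = 'U' ∧ g = 'S' then (d.2.2.1, d.2.2.2 + 1) else (d.2.2.1, d.2.2.2)
  (d1.1, d1.2, d2.1, d2.2)

-- literal port of A; the final `min …` is Python's fourth `if`, whose guard is
-- exhaustive once the three previous guards failed, so no value is lost.
def minimum_swap_cost (s : String) : Int :=
  let countOfU := PySem.Str.count s "U"
  let countOfS := PySem.Str.count s "S"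
  if countOfS > countOfU + 1 ∨ countOfU > countOfS + 1 then -1
  else
    let pats := (PySem.List.pyRange 0 (PySem.Str.len s) 1).foldl pvPatStep ([], [])
    let d := (PySem.List.pyRange 0 (PySem.Str.len s) 1).foldl
      (pvDiffStep s.toList pats.1 pats.2) (0, 0, 0, 0)
    if d.1 ≠ d.2.1 ∧ d.2.2.1 ≠ d.2.2.2 then -1
    else if d.1 = d.2.1 ∧ d.2.2.1 ≠ d.2.2.2 then d.1
    else if d.2.2.1 = d.2.2.2 ∧ d.1 ≠ d.2.1 then d.2.2.1
    else min d.2.2.1 d.1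

-- ===== PORT B =====
-- tally of one even-slot character into the state (evenS, oddS, evenU, oddU)
def pvAddEven (a : Char) (t : Int × Int × Int × Int) : Int × Int × Int × Int :=
  if a = 'S' then (t.1 + 1, t.2.1, t.2.2.1, t.2.2.2)
  else if a = 'U' then (t.1, t.2.1, t.2.2.1 + 1, t.2.2.2) else t

-- tally of one odd-slot character
def pvAddOdd (b : Char) (t : Int × Int × Int × Int) : Int × Int × Int × Int :=
  if b = 'S' then (t.1, t.2.1 + 1, t.2.2.1, t.2.2.2)
  else if b = 'U' then (t.1, t.2.1, t.2.2.1, t.2.2.2 + 1) else t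

-- B's pairwise loop: consume two slots per step (a one-element tail is an even slot
-- whose `next(it, None)` matched neither branch, so only the even tally happens)
def pvPairTally : List Char → Int × Int × Int × Int
  | [] => (0, 0, 0, 0)
  | [a] => pvAddEven a (0, 0, 0, 0)
  | a :: b :: r => pvAddEven a (pvAddOdd b (pvPairTally r))

def minimum_swap_cost_alt (s : String) : Int :=
  let t := pvPairTally s.toList
  if |(t.1 + t.2.1) - (t.2.2.1 + t.2.2.2)| > 1 then -1
  else
    let cands := (if t.2.1 = t.2.2.1 then [t.2.1] else []) ++
                 (if t.1 = t.2.2.2 then [t.1] else [])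
    match PySem.List.min? cands id with
    | some m => m
    | none => -1

-- ===== PRECONDITION & SPEC =====
def Spec_minimum_swap_cost (s : String) (out : Int) : Prop := out = minimum_swap_cost_alt s
instance (s : String) (out : Int) : Decidable (Spec_minimum_swap_cost s out) := by unfold Spec_minimum_swap_cost; infer_instance

-- ===== CLAIM (what is proved, stated in full; the proofs are below) =====
def Claim_equal_minimum_swap_cost : Prop := ∀ (s : String), Dom_minimum_swap_cost s → Spec_minimum_swap_cost s (minimum_swap_cost s)

-- ===== LEMMAS AND PROOFS =====

def pvC1 (i : Int) : Char := if PySem.Int.mod i 2 = 0 then 'S' else 'U'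
def pvC2 (i : Int) : Char := if PySem.Int.mod i 2 = 0 then 'U' else 'S'

theorem pv_patterns (L : List Int) (f g : List Char) :
    L.foldl pvPatStep (f, g) = (f ++ L.map pvC1, g ++ L.map pvC2) := by
  induction L generalizing f g with
  | nil => simp
  | cons i L ih =>
    simp only [List.foldl_cons, List.map_cons]
    by_cases h : PySem.Int.mod i 2 = 0
    · simp only [pvPatStep, pvC1, pvC2, if_pos h, ih]; simp
    · simp only [pvPatStep, pvC1, pvC2, if_neg h, ih]; simp

-- A's comparison-loop state (StoUDiff1, UtoSDiff1, StoUDiff2, UtoSDiff2) as a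
-- permutation of B's tally state (evenS, oddS, evenU, oddU)
def pvSwap (u : Int × Int × Int × Int) : Int × Int × Int × Int := (u.2.1, u.2.2.1, u.1, u.2.2.2)

-- B's tally of one indexed character, used only to bridge A's indexed loop to pvPairTally
def pvTallyStep (t : Int × Int × Int × Int) (p : Int × Char) : Int × Int × Int × Int :=
  if p.2 = 'S' then
    if PySem.Int.mod p.1 2 = 0 then (t.1 + 1, t.2.1, t.2.2.1, t.2.2.2)
    else (t.1, t.2.1 + 1, t.2.2.1, t.2.2.2)
  else if p.2 = 'U' then
    if PySem.Int.mod p.1 2 = 0 then (t.1, t.2.1, t.2.2.1 + 1, t.2.2.2)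
    else (t.1, t.2.1, t.2.2.1, t.2.2.2 + 1)
  else t

theorem pv_mod_dvd (i : Int) (he : PySem.Int.mod i 2 = 0) : (2:Int) ∣ i := by
  simp only [PySem.Int.mod, Int.fmod_eq_emod] at he; omega

theorem pv_mod_not_dvd (i : Int) (he : ¬ PySem.Int.mod i 2 = 0) : ¬ (2:Int) ∣ i := by
  simp only [PySem.Int.mod, Int.fmod_eq_emod] at he; omega

theorem pv_step (l : List Char) (i : Int) (h0 : 0 ≤ i) (h1 : i < (l.length : Int)) (u : Int × Int × Int × Int) :
    pvDiffStep l ((PySem.List.pyRange 0 (l.length : Int) 1).map pvC1)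
                 ((PySem.List.pyRange 0 (l.length : Int) 1).map pvC2) (pvSwap u) i
      = pvSwap (pvTallyStep u (i, PySem.List.pyGetD l i ' ')) := by
  have hf : PySem.List.pyGetD ((PySem.List.pyRange 0 (l.length : Int) 1).map pvC1) i ' ' = pvC1 i :=
    PySem.List.pyGetD_map_pyRange_of_nonneg pvC1 _ i ' ' h0 h1
  have hg : PySem.List.pyGetD ((PySem.List.pyRange 0 (l.length : Int) 1).map pvC2) i ' ' = pvC2 i :=
    PySem.List.pyGetD_map_pyRange_of_nonneg pvC2 _ i ' ' h0 h1
  obtain ⟨p, q, r, t⟩ := u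
  by_cases he : PySem.Int.mod i 2 = 0
  · have hd := pv_mod_dvd i he
    have hm : ¬ i % 2 = 1 := by omega
    by_cases hS : PySem.List.pyGetD l i ' ' = 'S' <;>
      by_cases hU : PySem.List.pyGetD l i ' ' = 'U' <;>
        first
          | (exfalso; rw [hS] at hU; exact absurd hU (by decide))
          | simp [pvDiffStep, pvTallyStep, pvSwap, pvC1, pvC2, hf, hg, hS, hU, he, hd, hm]
  · have hd := pv_mod_not_dvd i he
    have hm : i % 2 = 1 := by omega
    by_cases hS : PySem.List.pyGetD l i ' ' = 'S' <;>
      by_cases hU : PySem.List.pyGetD l i ' ' = 'U' <;>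
        first
          | (exfalso; rw [hS] at hU; exact absurd hU (by decide))
          | simp [pvDiffStep, pvTallyStep, pvSwap, pvC1, pvC2, hf, hg, hS, hU, he, hd, hm]

theorem pv_fold_corr (l : List Char) :
    ∀ (L : List Int), (∀ i ∈ L, 0 ≤ i ∧ i < (l.length : Int)) →
    ∀ u : Int × Int × Int × Int,
    L.foldl (pvDiffStep l ((PySem.List.pyRange 0 (l.length : Int) 1).map pvC1)
                          ((PySem.List.pyRange 0 (l.length : Int) 1).map pvC2)) (pvSwap u)
      = pvSwap (L.foldl (fun st j => pvTallyStep st (j, PySem.List.pyGetD l j ' ')) u) := by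
  intro L
  induction L with
  | nil => intro _ u; simp
  | cons i L ih =>
    intro hb u
    obtain ⟨h0, h1⟩ := hb i (by simp)
    simp only [List.foldl_cons, pv_step l i h0 h1 u]
    exact ih (fun j hj => hb j (by simp [hj])) _

theorem pv_enum_fold (l : List Char) :
    (PySem.List.enumerate l 0).foldl pvTallyStep (0, 0, 0, 0)
      = (PySem.List.pyRange 0 (l.length : Int) 1).foldl
          (fun st j => pvTallyStep st (j, PySem.List.pyGetD l j ' ')) (0, 0, 0, 0) := by
  rw [PySem.List.enumerate_eq_map_pyRange l ' ', List.foldl_map]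
  simp [PySem.List.len]

def pvTupAdd (u v : Int × Int × Int × Int) : Int × Int × Int × Int :=
  (u.1 + v.1, u.2.1 + v.2.1, u.2.2.1 + v.2.2.1, u.2.2.2 + v.2.2.2)

theorem pv_mod_succ (n : Int) (h : PySem.Int.mod n 2 = 0) : PySem.Int.mod (n + 1) 2 ≠ 0 := by
  simp only [PySem.Int.mod, Int.fmod_eq_emod] at *; omega

theorem pv_mod_succ2 (n : Int) (h : PySem.Int.mod n 2 = 0) : PySem.Int.mod (n + 1 + 1) 2 = 0 := by
  simp only [PySem.Int.mod, Int.fmod_eq_emod] at *; omega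

-- the enumerate-fold of B's tally, started at any even index, is pvPairTally
theorem pv_pair_fold (l : List Char) :
    ∀ (u : Int × Int × Int × Int) (n : Int), PySem.Int.mod n 2 = 0 →
    (PySem.List.enumerate l n).foldl pvTallyStep u = pvTupAdd u (pvPairTally l) := by
  induction l using pvPairTally.induct with
  | case1 =>
    intro u n _
    obtain ⟨p, q, r, t⟩ := u
    simp [PySem.List.enumerate_nil, pvPairTally, pvTupAdd]
  | case2 a =>
    intro u n hn
    have hd := pv_mod_dvd n hn
    obtain ⟨p, q, r, t⟩ := u
    by_cases hS : a = 'S' <;> by_cases hU : a = 'U' <;>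
      first
        | (exfalso; rw [hS] at hU; exact absurd hU (by decide))
        | simp [PySem.List.enumerate_cons, PySem.List.enumerate_nil, pvPairTally,
                pvTallyStep, pvAddEven, pvTupAdd, hn, hd, hS, hU]
  | case3 a b r ih =>
    intro u n hn
    have h1 := pv_mod_succ n hn
    have h2 := pv_mod_succ2 n hn
    have hd : (2:Int) ∣ n := pv_mod_dvd n hn
    have hnd : ¬ (2:Int) ∣ (n + 1) := pv_mod_not_dvd _ h1
    rw [PySem.List.enumerate_cons, PySem.List.enumerate_cons, List.foldl_cons, List.foldl_cons,
        ih _ _ h2]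
    obtain ⟨p, q, x, y⟩ := u
    rcases hT : pvPairTally r with ⟨p', q', x', y'⟩
    by_cases haS : a = 'S' <;> by_cases haU : a = 'U' <;>
      by_cases hbS : b = 'S' <;> by_cases hbU : b = 'U' <;>
        first
          | (exfalso; first | (rw [haS] at haU; exact absurd haU (by decide))
                            | (rw [hbS] at hbU; exact absurd hbU (by decide)))
          | (simp [pvPairTally, pvTallyStep, pvAddEven, pvAddOdd, pvTupAdd, hT,
                   hn, h1, hd, hnd, haS, haU, hbS, hbU, Prod.ext_iff] <;> omega)

-- PySem.Chars.count with a single-character needle is List.count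
theorem pv_count_go (sub : List Char) (fuel : Nat) (l : List Char) (acc : Nat) :
    PySem.Chars.count.go sub fuel l acc =
      match fuel, l with
      | 0, _ => acc
      | _ + 1, [] => acc
      | Nat.succ fuel, l@(_ :: t) =>
        if sub.isPrefixOf l then PySem.Chars.count.go sub fuel (List.drop sub.length l) (acc + 1)
        else PySem.Chars.count.go sub fuel t acc := by
  cases fuel <;> cases l <;> rfl

theorem pv_count_single_go (c : Char) (l : List Char) (fuel acc : Nat) (h : l.length ≤ fuel) :
    PySem.Chars.count.go [c] fuel l acc = acc + l.count c := by
  induction l generalizing fuel acc with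
  | nil => cases fuel <;> simp [pv_count_go]
  | cons a t ih =>
    cases fuel with
    | zero => simp at h
    | succ fuel =>
      rw [pv_count_go]
      by_cases hc : a = c
      · simp [List.isPrefixOf, hc, ih _ _ (by simpa using h)]
        omega
      · simp [List.isPrefixOf, hc, Ne.symm hc, ih _ _ (by simpa using Nat.le_of_succ_le_succ h)]

theorem pv_count_single (l : List Char) (c : Char) : PySem.Chars.count l [c] = l.count c := by
  simp [PySem.Chars.count, pv_count_single_go c l l.length 0 le_rfl]

-- the tallies sum to the total S- and U-counts
theorem pv_tally_counts (l : List Char) :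
    (pvPairTally l).1 + (pvPairTally l).2.1 = (l.count 'S' : Int) ∧
    (pvPairTally l).2.2.1 + (pvPairTally l).2.2.2 = (l.count 'U' : Int) := by
  induction l using pvPairTally.induct with
  | case1 => simp [pvPairTally]
  | case2 a =>
    by_cases hS : a = 'S' <;> by_cases hU : a = 'U' <;>
      first
        | (exfalso; rw [hS] at hU; exact absurd hU (by decide))
        | simp [pvPairTally, pvAddEven, hS, hU, List.count_cons]
  | case3 a b r ih =>
    rcases hT : pvPairTally r with ⟨p', q', x', y'⟩
    rw [hT] at ih
    by_cases haS : a = 'S' <;> by_cases haU : a = 'U' <;>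
      by_cases hbS : b = 'S' <;> by_cases hbU : b = 'U' <;>
        first
          | (exfalso; first | (rw [haS] at haU; exact absurd haU (by decide))
                            | (rw [hbS] at hbU; exact absurd hbU (by decide)))
          | (simp [pvPairTally, pvAddEven, pvAddOdd, hT, haS, haU, hbS, hbU,
                   List.count_cons] at * <;> omega)

theorem pv_guard (cS cU : Nat) :
    (|(cS : Int) - (cU : Int)| > 1) ↔ (cS > cU + 1 ∨ cU > cS + 1) := by
  rw [gt_iff_lt, lt_abs]
  omega

-- ===== VERDICT (by name: the statement is the Claim_ definition above) =====
theorem minimum_swap_cost_spec : Claim_equal_minimum_swap_cost := by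
  intro s _
  unfold Spec_minimum_swap_cost
  simp only [minimum_swap_cost, minimum_swap_cost_alt, PySem.Str.count_eq, PySem.Str.len_eq,
    show ("S".toList) = ['S'] from rfl, show ("U".toList) = ['U'] from rfl, pv_count_single]
  obtain ⟨hS, hU⟩ := pv_tally_counts s.toList
  by_cases hC : s.toList.count 'S' > s.toList.count 'U' + 1 ∨
      s.toList.count 'U' > s.toList.count 'S' + 1
  · rw [if_pos hC, if_pos (by rw [hS, hU]; exact (pv_guard _ _).mpr hC)]
  · have hgd : ¬ (|(pvPairTally s.toList).1 + (pvPairTally s.toList).2.1 -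
        ((pvPairTally s.toList).2.2.1 + (pvPairTally s.toList).2.2.2)| > 1) := by
      rw [hS, hU]; exact fun h => hC ((pv_guard _ _).mp h)
    have hpat := pv_patterns (PySem.List.pyRange 0 (s.toList.length : Int) 1) [] []
    simp only [List.nil_append] at hpat
    have hb : ∀ i ∈ PySem.List.pyRange 0 (s.toList.length : Int) 1, 0 ≤ i ∧ i < (s.toList.length : Int) := by
      intro i hi
      have := (PySem.List.mem_pyRange_one).1 hi
      omega
    have hfold := pv_fold_corr s.toList (PySem.List.pyRange 0 (s.toList.length : Int) 1) hb (0, 0, 0, 0)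
    simp only [pvSwap] at hfold
    have hpair := pv_pair_fold s.toList (0, 0, 0, 0) 0 (by decide)
    rw [pv_enum_fold] at hpair
    have hzero : pvTupAdd (0, 0, 0, 0) (pvPairTally s.toList) = pvPairTally s.toList := by
      simp [pvTupAdd]
    rw [hzero] at hpair
    simp only [if_neg hC, if_neg hgd, hpat, hfold, hpair]
    rcases hT : pvPairTally s.toList with ⟨p, q, r, t⟩
    by_cases h1 : q = r <;> by_cases h2 : p = t <;>
      simp [h1, h2, PySem.List.min?, min_def] <;> split_ifs <;> simp <;> omega
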